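-- pv_equiv track=rewrite | github.com/Picsart-AI-Research/OpenBias | utils/utils.py | remove_duplicated_biases
-- ===== SOURCE A (Python) =====
-- from copy import deepcopy
--
-- def remove_duplicated_biases(
--     bias_classes_merged,
--     bias_captions_merged,
-- ):
--     bias_captions_final = deepcopy(bias_captions_merged)
--     bias_classes_final = deepcopy(bias_classes_merged)
--
--     for bias_cluster in bias_captions_merged:
--         for idx, bias_name in enumerate(bias_captions_merged[bias_cluster]):
--             # check if the current bias name has not been removed previously
--             if bias_name in list(bias_captions_final[bias_cluster].keys()):
--                 # split bias name
--                 attribute_1 = bias_name.replace(bias_cluster, '').strip()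
--                 # for each other bias name
--                 for i in range(idx+1, len(list(bias_captions_merged[bias_cluster].keys()))):
--                     remaining_bias_name = list(bias_captions_merged[bias_cluster].keys())[i]
--                     # check if the remaining bias name has not been removed previously
--                     if remaining_bias_name in list(bias_captions_final[bias_cluster].keys()):
--                         # split remaining bias name
--                         attribute_2 = remaining_bias_name.replace(bias_cluster, '').strip()
--                         # compute similarity
--                         attribute_1_set = set(attribute_1.split())
--                         attribute_2_set = set(attribute_2.split())
--                         common = attribute_1_set & attribute_2_set
--                         # if one word in common
--                         if len(attribute_2_set) == 1 and len(common) > 0: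
--                             # remove the bias with the same classes
--                             del bias_captions_final[bias_cluster][remaining_bias_name]
--                             del bias_classes_final[bias_cluster][remaining_bias_name]
--
--     return bias_classes_final, bias_captions_final
-- ===== SOURCE B (Python) =====
-- def _dropped(cluster, names):
--     # one forward pass: a name whose attribute is a single already-seen word is dropped,
--     # otherwise its words join the seen set
--     seen = set()
--     dropped = set()
--     for name in names:
--         words = set(name.replace(cluster, '').strip().split())
--         if len(words) == 1 and not seen.isdisjoint(words):
--             dropped.add(name)
--         else:
--             seen |= words
--     return dropped
--
-- def remove_duplicated_biases(
--     bias_classes_merged,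
--     bias_captions_merged,
-- ):
--     dropped = {c: _dropped(c, names) for c, names in bias_captions_merged.items()}
--     bias_captions_final = {c: {n: v for n, v in names.items() if n not in dropped[c]}
--                            for c, names in bias_captions_merged.items()}
--     bias_classes_final = {c: {n: v for n, v in names.items() if n not in dropped.get(c, ())}
--                           for c, names in bias_classes_merged.items()}
--     return bias_classes_final, bias_captions_final
-- ===== Notes on version B (the rewrite author's own statement) =====
-- stated objective: faster
-- what changed: Replaces A's per-cluster nested pair scan (which rebuilds list(dict.keys()) inside the inner loop) by a single forward pass per cluster that accumulates the word set of surviving names and drops a name whose single-word attribute was already seen, then filters both dicts once by the per-cluster dropped set.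
import Mathlib
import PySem

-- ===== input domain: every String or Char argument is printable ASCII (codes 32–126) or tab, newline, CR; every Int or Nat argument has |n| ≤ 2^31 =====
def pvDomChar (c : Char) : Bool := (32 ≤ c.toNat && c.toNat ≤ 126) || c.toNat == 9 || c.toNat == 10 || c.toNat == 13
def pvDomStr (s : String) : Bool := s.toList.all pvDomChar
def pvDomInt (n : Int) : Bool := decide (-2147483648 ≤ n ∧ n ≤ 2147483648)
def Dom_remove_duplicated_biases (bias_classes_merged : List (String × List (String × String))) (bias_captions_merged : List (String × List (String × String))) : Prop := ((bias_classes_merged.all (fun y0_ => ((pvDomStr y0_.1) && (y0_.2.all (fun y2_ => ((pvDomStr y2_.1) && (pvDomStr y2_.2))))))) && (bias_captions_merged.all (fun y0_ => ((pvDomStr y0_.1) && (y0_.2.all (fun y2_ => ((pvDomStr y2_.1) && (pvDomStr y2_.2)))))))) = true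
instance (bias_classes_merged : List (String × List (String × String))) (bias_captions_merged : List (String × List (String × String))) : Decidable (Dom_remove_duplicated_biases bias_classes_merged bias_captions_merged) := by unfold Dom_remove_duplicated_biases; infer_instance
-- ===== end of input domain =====

-- B replaces A's per-cluster nested O(n^3) pair scan by one forward pass per cluster over the
-- names, accumulating the word set of surviving names and dropping a name whose single-word
-- attribute was already seen; both dicts are then filtered once by the per-cluster dropped set.

-- ===== PORT A =====
-- Exactness notes: dicts are PySem.Dict built from the association lists; `d[k]`/`del d[k]` are
-- modelled with getD (empty-dict default) / modify+erase — Pre_ guarantees every accessed key is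
-- present, exactly where the Python does not raise KeyError; `list(keys)[i]` is pyGetD (the index
-- is always in range here).
def remove_duplicated_biases (bias_classes_merged : List (String × List (String × String))) (bias_captions_merged : List (String × List (String × String))) : (List (String × List (String × String))) × (List (String × List (String × String))) :=
  let bias_captions_mergedD : PySem.Dict String (PySem.Dict String String) :=
    PySem.Dict.mk (bias_captions_merged.map (fun p => (p.1, PySem.Dict.mk p.2)))
  let bias_classes_mergedD : PySem.Dict String (PySem.Dict String String) :=
    PySem.Dict.mk (bias_classes_merged.map (fun p => (p.1, PySem.Dict.mk p.2)))
  let fin :=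
    bias_captions_mergedD.keys.foldl (fun st bias_cluster =>
      let inner := bias_captions_mergedD.getD bias_cluster (PySem.Dict.mk [])
      (PySem.List.enumerate inner.keys).foldl (fun st ip =>
        if ((st.2.getD bias_cluster (PySem.Dict.mk [])).keys).contains ip.2 then
          let attribute_1 := PySem.Str.strip (PySem.Str.replace ip.2 bias_cluster "")
          (PySem.List.pyRange (ip.1 + 1) (PySem.List.len inner.keys) 1).foldl (fun st i =>
            let remaining_bias_name := PySem.List.pyGetD inner.keys i ""
            if ((st.2.getD bias_cluster (PySem.Dict.mk [])).keys).contains remaining_bias_name then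
              let attribute_2 := PySem.Str.strip (PySem.Str.replace remaining_bias_name bias_cluster "")
              let attribute_1_set := PySem.Set.ofList (PySem.Str.split₀ attribute_1)
              let attribute_2_set := PySem.Set.ofList (PySem.Str.split₀ attribute_2)
              let common := PySem.Set.inter attribute_1_set attribute_2_set
              if PySem.Set.len attribute_2_set = 1 ∧ 0 < PySem.Set.len common then
                (st.1.modify bias_cluster (PySem.Dict.mk []) (fun d => d.erase remaining_bias_name),
                 st.2.modify bias_cluster (PySem.Dict.mk []) (fun d => d.erase remaining_bias_name))
              else st
            else st) st
        else st) st)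
      (bias_classes_mergedD, bias_captions_mergedD)
  (fin.1.items.map (fun p => (p.1, p.2.items)), fin.2.items.map (fun p => (p.1, p.2.items)))

-- ===== PORT B =====
-- one forward pass over a cluster's names: a name whose attribute is a single already-seen word
-- is dropped, otherwise its words join the seen set
def pvDropped (cluster : String) (names : List String) : PySem.Set String :=
  (names.foldl (fun (st : PySem.Set String × PySem.Set String) name =>
      let words := PySem.Set.ofList (PySem.Str.split₀ (PySem.Str.strip (PySem.Str.replace name cluster "")))
      if PySem.Set.len words = 1 ∧ ¬ PySem.Set.isdisjoint st.1 words then (st.1, PySem.Set.add st.2 name)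
      else (PySem.Set.union st.1 words, st.2))
    (PySem.Set.empty, PySem.Set.empty)).2

-- dict comprehensions over dicts (keys unique under Pre_) are ported as map/filter over the
-- association lists; dropped[c] / dropped.get(c, ()) are both getD with an empty-set default
-- (the key is present exactly when Python's dropped[c] lookup happens)
def remove_duplicated_biases_alt (bias_classes_merged : List (String × List (String × String))) (bias_captions_merged : List (String × List (String × String))) : (List (String × List (String × String))) × (List (String × List (String × String))) :=
  let dropped : PySem.Dict String (PySem.Set String) :=
    PySem.Dict.mk (bias_captions_merged.map (fun p => (p.1, pvDropped p.1 (p.2.map (fun q => q.1)))))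
  let bias_captions_final := bias_captions_merged.map (fun p =>
    (p.1, p.2.filter (fun q => !(PySem.Dict.getD dropped p.1 PySem.Set.empty).contains q.1)))
  let bias_classes_final := bias_classes_merged.map (fun p =>
    (p.1, p.2.filter (fun q => !(PySem.Dict.getD dropped p.1 PySem.Set.empty).contains q.1)))
  (bias_classes_final, bias_captions_final)

-- ===== PRECONDITION & SPEC =====
-- the word set of a bias name's attribute (the expression both ports compute)
def pvW (c n : String) : PySem.Set String :=
  PySem.Set.ofList (PySem.Str.split₀ (PySem.Str.strip (PySem.Str.replace n c "")))
-- closed-form description of the names the removal hits: a name with a single-word attribute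
-- whose word already occurs in some earlier name's attribute (the earliest such earlier name is
-- never itself removed, so the removal indeed fires on r)
def pvDropSpec (c : String) (ks : List String) (r : String) : Prop :=
  PySem.Set.len (pvW c r) = 1 ∧
  ∃ i < ks.length, ks.getD i "" = r ∧ ∃ j < i,
    0 < PySem.Set.len (PySem.Set.inter (pvW c (ks.getD j "")) (pvW c r))

-- Pre_ excludes (i) association lists with duplicate keys at either level — they do not
-- represent Python dicts, whose keys are unique — and (ii) exactly the inputs on which A raises
-- KeyError: a caption name that actually gets removed (closed form: pvDropSpec) while the
-- classes dict lacks that cluster or lacks that name inside it — there A's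
-- `del bias_classes_final[cluster][name]` raises.
def Pre_remove_duplicated_biases (bias_classes_merged : List (String × List (String × String))) (bias_captions_merged : List (String × List (String × String))) : Prop :=
  ((bias_classes_merged.map (fun p => p.1)).Nodup ∧ ∀ p ∈ bias_classes_merged, (p.2.map (fun q => q.1)).Nodup) ∧
  ((bias_captions_merged.map (fun p => p.1)).Nodup ∧ ∀ p ∈ bias_captions_merged, (p.2.map (fun q => q.1)).Nodup) ∧
  (∀ p ∈ bias_captions_merged, ∀ r ∈ p.2.map (fun q => q.1),
    pvDropSpec p.1 (p.2.map (fun q => q.1)) r →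
      ∃ q ∈ bias_classes_merged, q.1 = p.1 ∧ r ∈ q.2.map (fun z => z.1))
instance (bias_classes_merged : List (String × List (String × String))) (bias_captions_merged : List (String × List (String × String))) : Decidable (Pre_remove_duplicated_biases bias_classes_merged bias_captions_merged) := by unfold Pre_remove_duplicated_biases pvDropSpec; infer_instance

def pvWitness_remove_duplicated_biases : (List (String × List (String × String))) × (List (String × List (String × String))) :=
  ([("age", [("age old", "c1"), ("age young", "c2"), ("age very old", "c3")])],
   [("age", [("age very old", "x"), ("age old", "y"), ("age young", "z")])])

def Spec_remove_duplicated_biases (bias_classes_merged : List (String × List (String × String))) (bias_captions_merged : List (String × List (String × String))) (out : (List (String × List (String × String))) × (List (String × List (String × String)))) : Prop := out = remove_duplicated_biases_alt bias_classes_merged bias_captions_merged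
instance (bias_classes_merged : List (String × List (String × String))) (bias_captions_merged : List (String × List (String × String))) (out : (List (String × List (String × String))) × (List (String × List (String × String)))) : Decidable (Spec_remove_duplicated_biases bias_classes_merged bias_captions_merged out) := by unfold Spec_remove_duplicated_biases; infer_instance

-- ===== CLAIM (what is proved, stated in full; the proofs are below) =====
def Claim_equal_remove_duplicated_biases : Prop := ∀ (bias_classes_merged : List (String × List (String × String))) (bias_captions_merged : List (String × List (String × String))), Dom_remove_duplicated_biases bias_classes_merged bias_captions_merged → Pre_remove_duplicated_biases bias_classes_merged bias_captions_merged → Spec_remove_duplicated_biases bias_classes_merged bias_captions_merged (remove_duplicated_biases bias_classes_merged bias_captions_merged)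

-- ===== LEMMAS AND PROOFS =====

-- no later name of the cluster has a single-word attribute overlapping an earlier name's words
-- (exactly: no removal ever fires in this cluster)
def pvPairFree (c : String) (ks : List String) : Prop :=
  ks.Pairwise (fun n r => ¬(PySem.Set.len (pvW c r) = 1 ∧
    0 < PySem.Set.len (PySem.Set.inter (pvW c n) (pvW c r))))

-- the drop condition of B's forward pass, at seen-set S
def pvDropC (c : String) (S : PySem.Set String) (n : String) : Bool :=
  decide (PySem.Set.len (pvW c n) = 1 ∧ ¬ PySem.Set.isdisjoint S (pvW c n))
-- A's removal condition between a surviving name n and a later name r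
def pvCondB (c n r : String) : Bool :=
  decide (PySem.Set.len (pvW c r) = 1 ∧ 0 < PySem.Set.len (PySem.Set.inter (pvW c n) (pvW c r)))
-- A's inner-loop step, localised to the two inner dicts of the current cluster
def pvInner (c n : String) (st : PySem.Dict String String × PySem.Dict String String) (r : String) :
    PySem.Dict String String × PySem.Dict String String :=
  if (st.2.keys).contains r ∧ PySem.Set.len (pvW c r) = 1 ∧
      0 < PySem.Set.len (PySem.Set.inter (pvW c n) (pvW c r)) then
    (st.1.erase r, st.2.erase r)
  else st
-- A's outer loop, localised
def pvARec (c : String) : List String → (PySem.Dict String String × PySem.Dict String String) → (PySem.Dict String String × PySem.Dict String String)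
  | [], st => st
  | n :: t, st => pvARec c t (if (st.2.keys).contains n then t.foldl (pvInner c n) st else st)
-- the names B drops, as a recursion threading the seen set
def pvDropList (c : String) : List String → PySem.Set String → List String
  | [], _ => []
  | n :: t, S => if pvDropC c S n then n :: pvDropList c t S else pvDropList c t (S.union (pvW c n))
-- survival of key k through A's remaining run (suffix t, seen set S)
def pvSurv (c : String) : List String → PySem.Set String → String → Bool
  | [], _, _ => true
  | n :: t, S, k =>
    if pvDropC c S n then pvSurv c t S k
    else !(t.contains k && !pvDropC c S k && pvDropC c (S.union (pvW c n)) k) &&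
      pvSurv c t (S.union (pvW c n)) k

-- ----- small bridging lemmas -----

theorem pvKeysContains {ν : Type} (d : PySem.Dict String ν) (k : String) :
    d.keys.contains k = d.contains k := by
  rcases d with ⟨items⟩
  induction items with
  | nil => rfl
  | cons p t ih =>
    simp only [PySem.Dict.keys, PySem.Dict.contains, List.map_cons, List.contains_cons,
      List.any_cons] at *
    rw [← ih, Bool.beq_comm]
theorem pvContains_erase (d : PySem.Dict String String) (r s : String) :
    (d.erase r).contains s = (!(s == r) && d.contains s) := by
  by_cases h : s = r
  · subst h
    simp only [PySem.Dict.erase, PySem.Dict.contains, List.any_filter]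
    simp
  · have hb : (s == r) = false := by simp [h]
    simp only [PySem.Dict.erase, PySem.Dict.contains, List.any_filter, hb, Bool.not_false,
      Bool.true_and]
    rw [Bool.eq_iff_iff]
    simp only [List.any_eq_true, Bool.and_eq_true, Bool.not_eq_true', beq_eq_false_iff_ne,
      beq_iff_eq]
    constructor
    · rintro ⟨p, hp, -, h2⟩; exact ⟨p, hp, h2⟩
    · rintro ⟨p, hp, h2⟩; exact ⟨p, hp, h2 ▸ h, h2⟩

theorem pvAny_filter_key (l : List (String × String)) (f : String → Bool) (m : String) :
    ((l.filter (fun p => f p.1)).any (fun p => p.1 == m)) = (f m && l.any (fun p => p.1 == m)) := by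
  induction l with
  | nil => simp
  | cons p l ih =>
    by_cases hp : p.1 = m
    · subst hp
      by_cases hf : f p.1 <;> simp [hf, ih]
    · have hb : (p.1 == m) = false := by simp [hp]
      by_cases hf : f p.1 <;> simp [hf, ih, hb]

theorem pvContains_mk_filter (d : PySem.Dict String String) (f : String → Bool) (m : String) :
    (PySem.Dict.mk (d.items.filter (fun p => f p.1))).contains m = (f m && d.contains m) := by
  simp only [PySem.Dict.contains]
  exact pvAny_filter_key d.items f m

theorem pvNotDisjoint_iff (s t : PySem.Set String) :
    (¬ PySem.Set.isdisjoint s t) ↔ ∃ x ∈ s, x ∈ t := by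
  simp only [PySem.Set.isdisjoint, Bool.not_eq_true, Bool.not_eq_false, List.any_eq_true]
  simp [PySem.Set.contains_eq_listContains, List.contains_iff_mem]
theorem pvInterPos_iff (s t : PySem.Set String) :
    (0 < PySem.Set.len (PySem.Set.inter s t)) ↔ ∃ x ∈ s, x ∈ t := by
  simp only [PySem.Set.len, PySem.Set.inter, PySem.Set.contains_eq_listContains]
  rw [Int.natCast_pos, List.length_pos_iff_exists_mem]
  simp [List.mem_filter, List.contains_iff_mem]
theorem pvDropC_iff (c : String) (S : PySem.Set String) (m : String) :
    pvDropC c S m = true ↔ (PySem.Set.len (pvW c m) = 1 ∧ ∃ x ∈ S, x ∈ pvW c m) := by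
  simp only [pvDropC, decide_eq_true_eq, pvNotDisjoint_iff]

theorem pvDropC_empty (c m : String) : pvDropC c PySem.Set.empty m = false := by
  rw [Bool.eq_false_iff, ne_eq, pvDropC_iff]
  rintro ⟨-, x, hx, -⟩
  simp [PySem.Set.empty] at hx

theorem pvDropC_mono (c : String) (S w : PySem.Set String) (m : String)
    (h : pvDropC c S m = true) : pvDropC c (S.union w) m = true := by
  rw [pvDropC_iff] at h ⊢
  rcases h with ⟨h1, x, hx, hxm⟩
  exact ⟨h1, x, by simp [PySem.Set.mem_union, hx], hxm⟩

theorem pvCondB_eq (c n : String) (S : PySem.Set String) (m : String)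
    (h : pvDropC c S m = false) :
    pvCondB c n m = pvDropC c (S.union (pvW c n)) m := by
  rw [Bool.eq_iff_iff, pvDropC_iff]
  simp only [pvCondB, decide_eq_true_eq, pvInterPos_iff]
  constructor
  · rintro ⟨h1, x, hxn, hxm⟩
    exact ⟨h1, x, by simp [PySem.Set.mem_union, hxn], hxm⟩
  · rintro ⟨h1, x, hxu, hxm⟩
    refine ⟨h1, x, ?_, hxm⟩
    rcases (by simpa [PySem.Set.mem_union] using hxu : x ∈ S ∨ x ∈ pvW c n) with hx | hx
    · exfalso
      rw [Bool.eq_false_iff, ne_eq, pvDropC_iff] at h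
      exact h ⟨h1, x, hx, hxm⟩
    · exact hx

-- erased key stays erased / erase characterisation used through MAIN

theorem pvSurv_not_mem (c : String) (t : List String) :
    ∀ (S : PySem.Set String) (k : String), k ∉ t → pvSurv c t S k = true := by
  induction t with
  | nil => intro S k _; rfl
  | cons n t ih =>
    intro S k hk
    have hk1 : k ≠ n := fun h => hk (h ▸ List.mem_cons_self ..)
    have hk2 : k ∉ t := fun h => hk (List.mem_cons_of_mem _ h)
    by_cases h : pvDropC c S n = true
    · simp [pvSurv, h, ih _ _ hk2]
    · simp [pvSurv, h, ih _ _ hk2, List.contains_iff_mem, hk2]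

theorem pvDropList_subset (c : String) (t : List String) :
    ∀ (S : PySem.Set String) (m : String), m ∈ pvDropList c t S → m ∈ t := by
  induction t with
  | nil => intro S m h; simp [pvDropList] at h
  | cons n t ih =>
    intro S m h
    by_cases hd : pvDropC c S n = true
    · simp only [pvDropList, hd, if_true, List.mem_cons] at h
      rcases h with h | h
      · exact h ▸ List.mem_cons_self ..
      · exact List.mem_cons_of_mem _ (ih _ _ h)
    · simp only [pvDropList, hd, if_false, Bool.false_eq_true] at h
      exact List.mem_cons_of_mem _ (ih _ _ h)

theorem pvMemDrop (c : String) (t : List String) :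
    ∀ (S : PySem.Set String) (k : String), k ∈ t → pvDropC c S k = true →
      k ∈ pvDropList c t S := by
  induction t with
  | nil => intro S k h; simp at h
  | cons n t ih =>
    intro S k hk hd
    rcases List.mem_cons.mp hk with h | h
    · subst h
      simp [pvDropList, hd]
    · by_cases hn : pvDropC c S n = true
      · simp only [pvDropList, hn, if_true, List.mem_cons]
        exact Or.inr (ih _ _ h hd)
      · simp only [pvDropList, hn, if_false, Bool.false_eq_true]
        exact ih _ _ h (pvDropC_mono _ _ _ _ hd)

theorem pvSurv_eq (c : String) (t : List String) :
    ∀ (S : PySem.Set String) (k : String), (pvDropC c S k = false ∨ k ∉ t) →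
      pvSurv c t S k = !(pvDropList c t S).contains k := by
  induction t with
  | nil => intro S k _; simp [pvSurv, pvDropList]
  | cons n t ih =>
    intro S k hk
    by_cases hn : pvDropC c S n = true
    · -- dropped head
      have hkn : k ≠ n := by
        rcases hk with hk | hk
        · intro h; rw [h] at hk; rw [hn] at hk; cases hk
        · intro h; exact hk (h ▸ List.mem_cons_self ..)
      have ht : pvDropC c S k = false ∨ k ∉ t := by
        rcases hk with hk | hk
        · exact Or.inl hk
        · exact Or.inr (fun h => hk (List.mem_cons_of_mem _ h))
      simp [pvSurv, pvDropList, hn, ih _ _ ht, List.contains_iff_mem, hkn, Ne.symm hkn]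
    · -- kept head
      by_cases hkt : k ∈ t
      · have hks : pvDropC c S k = false := by
          rcases hk with hk | hk
          · exact hk
          · exact absurd (List.mem_cons_of_mem _ hkt) hk
        by_cases hS' : pvDropC c (S.union (pvW c n)) k = true
        · have hmem : k ∈ pvDropList c t (S.union (pvW c n)) := pvMemDrop c t _ k hkt hS'
          simp [pvSurv, pvDropList, hn, List.contains_iff_mem, hkt, hks, hS', hmem]
        · have := ih (S.union (pvW c n)) k (Or.inl (by simpa using hS'))
          simp [pvSurv, pvDropList, hn, List.contains_iff_mem, hkt, hks, hS', this]
      · have h1 : pvSurv c t (S.union (pvW c n)) k = true := pvSurv_not_mem c t _ k hkt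
        have h2 : k ∉ pvDropList c t (S.union (pvW c n)) :=
          fun h => hkt (pvDropList_subset c t _ k h)
        simp [pvSurv, pvDropList, hn, List.contains_iff_mem, hkt, h1, h2]

-- pvInner with its condition read off the second dict directly
theorem pvInner_char (c n r : String) (x y : PySem.Dict String String) :
    pvInner c n (x, y) r =
      if (y.contains r && pvCondB c n r) = true then (x.erase r, y.erase r) else (x, y) := by
  simp only [pvInner, pvKeysContains]
  split_ifs with h1 h2 h2
  · rfl
  · exfalso; apply h2
    simp only [Bool.and_eq_true]
    exact ⟨h1.1, decide_eq_true h1.2⟩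
  · exfalso; apply h1
    simp only [Bool.and_eq_true] at h2
    exact ⟨h2.1, of_decide_eq_true h2.2⟩
  · rfl

-- A's inner loop over the remaining names erases, from both inner dicts, exactly the
-- still-present names with a single-word attribute overlapping the current name's words
theorem pvInner_foldl (c n : String) (t : List String) : ∀ (x y : PySem.Dict String String),
    t.foldl (pvInner c n) (x, y) =
      (PySem.Dict.mk (x.items.filter (fun p => !(t.contains p.1 && y.contains p.1 && pvCondB c n p.1))),
       PySem.Dict.mk (y.items.filter (fun p => !(t.contains p.1 && y.contains p.1 && pvCondB c n p.1)))) := by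
  induction t with
  | nil =>
    intro x y
    simp
  | cons r t ih =>
    intro x y
    rw [List.foldl_cons, pvInner_char]
    by_cases hy : y.contains r = true
    · by_cases hB : pvCondB c n r = true
      · rw [if_pos (by rw [hy, hB]; rfl), ih]
        have hxl : ∀ (z : PySem.Dict String String),
            (z.erase r).items.filter
              (fun p => !(t.contains p.1 && (y.erase r).contains p.1 && pvCondB c n p.1)) =
            z.items.filter
              (fun p => !((r :: t).contains p.1 && y.contains p.1 && pvCondB c n p.1)) := by
          intro z
          show (z.items.filter _).filter _ = _
          rw [List.filter_filter]
          apply List.filter_congr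
          intro p _
          by_cases hp : p.1 = r
          · simp [hp, hy, hB, List.contains_cons]
          · have hb : (p.1 == r) = false := by simp [hp]
            simp [pvContains_erase, hb, hp, List.contains_cons]
        rw [hxl x, hxl y]
      · have hBf : pvCondB c n r = false := by simpa using hB
        rw [if_neg (by rw [hBf]; simp), ih]
        have hxl : ∀ (z : PySem.Dict String String),
            z.items.filter (fun p => !(t.contains p.1 && y.contains p.1 && pvCondB c n p.1)) =
            z.items.filter (fun p => !((r :: t).contains p.1 && y.contains p.1 && pvCondB c n p.1)) := by
          intro z
          apply List.filter_congr
          intro p _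
          by_cases hp : p.1 = r
          · simp [hp, hBf, List.contains_cons]
          · have hb : (p.1 == r) = false := by simp [hp]
            simp [hb, hp, List.contains_cons]
        rw [hxl x, hxl y]
    · have hyf : y.contains r = false := by simpa using hy
      rw [if_neg (by rw [hyf]; simp), ih]
      have hxl : ∀ (z : PySem.Dict String String),
          z.items.filter (fun p => !(t.contains p.1 && y.contains p.1 && pvCondB c n p.1)) =
          z.items.filter (fun p => !((r :: t).contains p.1 && y.contains p.1 && pvCondB c n p.1)) := by
        intro z
        apply List.filter_congr
        intro p _
        by_cases hp : p.1 = r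
        · simp [hp, hyf, List.contains_cons]
        · have hb : (p.1 == r) = false := by simp [hp]
          simp [hb, hp, List.contains_cons]
      rw [hxl x, hxl y]

-- MAIN: A's localised double loop filters both inner dicts by survival
theorem pvARec_spec (c : String) (t : List String) : ∀ (S : PySem.Set String)
    (x y : PySem.Dict String String),
    (∀ m ∈ t, y.contains m = !pvDropC c S m) →
    pvARec c t (x, y) =
      (PySem.Dict.mk (x.items.filter (fun p => pvSurv c t S p.1)),
       PySem.Dict.mk (y.items.filter (fun p => pvSurv c t S p.1))) := by
  induction t with
  | nil =>
    intro S x y _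
    simp [pvARec, pvSurv]
  | cons n t ih =>
    intro S x y hy
    have hyn : y.contains n = !pvDropC c S n := hy n (List.mem_cons_self ..)
    by_cases hd : pvDropC c S n = true
    · have hskip : (y.keys).contains n = false := by
        rw [pvKeysContains, hyn, hd]; rfl
      have hmemn : n ∉ y.keys := by simpa using hskip
      have hA : pvARec c (n :: t) (x, y) = pvARec c t (x, y) := by
        simp [pvARec, hmemn]
      rw [hA, ih S x y (fun m hm => hy m (List.mem_cons_of_mem _ hm))]
      have hsv : ∀ (k : String), pvSurv c (n :: t) S k = pvSurv c t S k := by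
        intro k; simp [pvSurv, hd]
      simp only [hsv]
    · have hdf : pvDropC c S n = false := by simpa using hd
      have htake : (y.keys).contains n = true := by
        rw [pvKeysContains, hyn]; simp [hdf]
      have hmemn : n ∈ y.keys := by simpa using htake
      have hstep : pvARec c (n :: t) (x, y) = pvARec c t (t.foldl (pvInner c n) (x, y)) := by
        simp [pvARec, hmemn]
      rw [hstep, pvInner_foldl]
      set S' := S.union (pvW c n) with hS'
      set Q : String → Bool :=
        fun k => !(t.contains k && y.contains k && pvCondB c n k) with hQ
      have hy' : ∀ m ∈ t,
          (PySem.Dict.mk (y.items.filter (fun p => Q p.1))).contains m = !pvDropC c S' m := by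
        intro m hm
        rw [pvContains_mk_filter y (fun k => Q k) m]
        have hym : y.contains m = !pvDropC c S m := hy m (List.mem_cons_of_mem _ hm)
        by_cases hdm : pvDropC c S m = true
        · have h1 : y.contains m = false := by rw [hym]; simp [hdm]
          have h2 : pvDropC c S' m = true := pvDropC_mono c S (pvW c n) m hdm
          simp [hQ, h1, h2]
        · have hdmf : pvDropC c S m = false := by simpa using hdm
          have h1 : y.contains m = true := by rw [hym]; simp [hdmf]
          have h2 : pvCondB c n m = pvDropC c S' m := pvCondB_eq c n S m hdmf
          simp [hQ, h1, h2, hm]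
      rw [ih S' _ _ hy']
      have hfl : ∀ (z : PySem.Dict String String),
          (z.items.filter (fun p => Q p.1)).filter (fun p => pvSurv c t S' p.1) =
          z.items.filter (fun p => pvSurv c (n :: t) S p.1) := by
        intro z
        rw [List.filter_filter]
        apply List.filter_congr
        intro p _
        have hsv : pvSurv c (n :: t) S p.1 =
            (!(t.contains p.1 && !pvDropC c S p.1 && pvDropC c S' p.1) && pvSurv c t S' p.1) := by
          simp [pvSurv, hdf, hS']
        rw [hsv]
        by_cases hpt : p.1 ∈ t
        · have hym : y.contains p.1 = !pvDropC c S p.1 := hy p.1 (List.mem_cons_of_mem _ hpt)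
          by_cases hdm : pvDropC c S p.1 = true
          · have h1 : y.contains p.1 = false := by rw [hym]; simp [hdm]
            simp [hQ, h1, hdm, hpt]
          · have hdmf : pvDropC c S p.1 = false := by simpa using hdm
            have h1 : y.contains p.1 = true := by rw [hym]; simp [hdmf]
            have h2 : pvCondB c n p.1 = pvDropC c S' p.1 := pvCondB_eq c n S p.1 hdmf
            simp [hQ, h1, h2, hdmf, hpt, Bool.and_comm]
        · simp [hQ, hpt]
      rw [hfl x, hfl y]

-- A's step functions on the global pair of dicts (definitionally the lambdas of the port)
def pvGInner (c n : String)
    (st : PySem.Dict String (PySem.Dict String String) × PySem.Dict String (PySem.Dict String String))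
    (r : String) :
    PySem.Dict String (PySem.Dict String String) × PySem.Dict String (PySem.Dict String String) :=
  if ((st.2.getD c (PySem.Dict.mk [])).keys).contains r then
    if PySem.Set.len (pvW c r) = 1 ∧
        0 < PySem.Set.len (PySem.Set.inter (pvW c n) (pvW c r)) then
      (st.1.modify c (PySem.Dict.mk []) (fun d => d.erase r),
       st.2.modify c (PySem.Dict.mk []) (fun d => d.erase r))
    else st
  else st

def pvGOuter (c : String) (ks : List String)
    (st : PySem.Dict String (PySem.Dict String String) × PySem.Dict String (PySem.Dict String String))
    (ip : Int × String) :
    PySem.Dict String (PySem.Dict String String) × PySem.Dict String (PySem.Dict String String) :=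
  if ((st.2.getD c (PySem.Dict.mk [])).keys).contains ip.2 then
    (PySem.List.pyRange (ip.1 + 1) (PySem.List.len ks) 1).foldl
      (fun st i => pvGInner c ip.2 st (PySem.List.pyGetD ks i "")) st
  else st

def pvGCluster (capM : PySem.Dict String (PySem.Dict String String))
    (st : PySem.Dict String (PySem.Dict String String) × PySem.Dict String (PySem.Dict String String))
    (c : String) :
    PySem.Dict String (PySem.Dict String String) × PySem.Dict String (PySem.Dict String String) :=
  (PySem.List.enumerate (capM.getD c (PySem.Dict.mk [])).keys).foldl
    (pvGOuter c (capM.getD c (PySem.Dict.mk [])).keys) st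

-- the A port IS the fold of these steps (definitional)
theorem pvA_eq (cls cap : List (String × List (String × String))) :
    remove_duplicated_biases cls cap =
      Prod.mk
        (List.map (fun p => (p.1, PySem.Dict.items p.2))
          (PySem.Dict.items (Prod.fst
            (List.foldl (pvGCluster (PySem.Dict.mk (cap.map (fun p => (p.1, PySem.Dict.mk p.2)))))
              (Prod.mk (PySem.Dict.mk (cls.map (fun p => (p.1, PySem.Dict.mk p.2))))
                (PySem.Dict.mk (cap.map (fun p => (p.1, PySem.Dict.mk p.2)))))
              (PySem.Dict.keys (PySem.Dict.mk (cap.map (fun p => (p.1, PySem.Dict.mk p.2)))))))))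
        (List.map (fun p => (p.1, PySem.Dict.items p.2))
          (PySem.Dict.items (Prod.snd
            (List.foldl (pvGCluster (PySem.Dict.mk (cap.map (fun p => (p.1, PySem.Dict.mk p.2)))))
              (Prod.mk (PySem.Dict.mk (cls.map (fun p => (p.1, PySem.Dict.mk p.2))))
                (PySem.Dict.mk (cap.map (fun p => (p.1, PySem.Dict.mk p.2)))))
              (PySem.Dict.keys (PySem.Dict.mk (cap.map (fun p => (p.1, PySem.Dict.mk p.2))))))))) := rfl


-- re-inserting the value already at a key is the identity
theorem pvInsert_getD_self (X : PySem.Dict String (PySem.Dict String String)) (c : String)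
    (hc : X.contains c = true) (hnd : X.keys.Nodup) :
    X.insert c (X.getD c (PySem.Dict.mk [])) = X := by
  apply PySem.Dict.ext
  rw [PySem.Dict.items_insert_of_contains X _ hc]
  conv_rhs => rw [← List.map_id X.items]
  apply List.map_congr_left
  intro p hp
  by_cases hpc : (p.1 == c) = true
  · have hc1 : p.1 = c := by simpa using hpc
    have hv : X.getD c (PySem.Dict.mk []) = p.2 := by
      rw [← hc1]
      exact PySem.Dict.getD_of_mem_items X (by simpa using hp) hnd _
    simp [hpc, hv, Prod.ext_iff, hc1]
  · simp [hpc]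

theorem pvGInner_char (c n r : String)
    (X Y : PySem.Dict String (PySem.Dict String String)) :
    pvGInner c n (X, Y) r =
      if ((Y.getD c (PySem.Dict.mk [])).contains r && pvCondB c n r) = true then
        (X.insert c ((X.getD c (PySem.Dict.mk [])).erase r),
         Y.insert c ((Y.getD c (PySem.Dict.mk [])).erase r))
      else (X, Y) := by
  simp only [pvGInner, pvKeysContains, PySem.Dict.modify]
  split_ifs with h1 h2 h3 h4 h5
  · rfl
  · exfalso; apply h3
    simp only [Bool.and_eq_true]
    exact ⟨h1, decide_eq_true h2⟩
  · exfalso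
    simp only [Bool.and_eq_true] at h4
    exact h2 (of_decide_eq_true h4.2)
  · rfl
  · exfalso
    simp only [Bool.and_eq_true] at h5
    exact h1 h5.1
  · rfl

theorem pvGOuter_char (c : String) (ks : List String) (s : Int) (n : String)
    (X Y : PySem.Dict String (PySem.Dict String String)) :
    pvGOuter c ks (X, Y) (s, n) =
      if ((Y.getD c (PySem.Dict.mk [])).contains n) = true then
        (PySem.List.pyRange (s + 1) (PySem.List.len ks) 1).foldl
          (fun st i => pvGInner c n st (PySem.List.pyGetD ks i "")) (X, Y)
      else (X, Y) := by
  simp only [pvGOuter, pvKeysContains]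

-- lifting A's inner loop to the global dicts
theorem pvLiftInner (c n : String) (t : List String) :
    ∀ (X Y : PySem.Dict String (PySem.Dict String String)),
      X.contains c = true → Y.contains c = true → X.keys.Nodup → Y.keys.Nodup →
      t.foldl (pvGInner c n) (X, Y) =
        (X.insert c ((t.foldl (pvInner c n)
            (X.getD c (PySem.Dict.mk []), Y.getD c (PySem.Dict.mk []))).1),
         Y.insert c ((t.foldl (pvInner c n)
            (X.getD c (PySem.Dict.mk []), Y.getD c (PySem.Dict.mk []))).2)) := by
  induction t with
  | nil =>
    intro X Y hX hY hndX hndY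
    simp only [List.foldl_nil]
    rw [pvInsert_getD_self X c hX hndX, pvInsert_getD_self Y c hY hndY]
  | cons r t ih =>
    intro X Y hX hY hndX hndY
    rw [List.foldl_cons, List.foldl_cons, pvGInner_char, pvInner_char]
    by_cases hb : ((Y.getD c (PySem.Dict.mk [])).contains r && pvCondB c n r) = true
    · rw [if_pos hb, if_pos hb]
      have hX' : (X.insert c ((X.getD c (PySem.Dict.mk [])).erase r)).contains c = true :=
        PySem.Dict.contains_insert_self X c _
      have hY' : (Y.insert c ((Y.getD c (PySem.Dict.mk [])).erase r)).contains c = true :=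
        PySem.Dict.contains_insert_self Y c _
      have hndX' : (X.insert c ((X.getD c (PySem.Dict.mk [])).erase r)).keys.Nodup := by
        rw [PySem.Dict.keys_insert_of_contains X _ hX]; exact hndX
      have hndY' : (Y.insert c ((Y.getD c (PySem.Dict.mk [])).erase r)).keys.Nodup := by
        rw [PySem.Dict.keys_insert_of_contains Y _ hY]; exact hndY
      rw [ih _ _ hX' hY' hndX' hndY']
      rw [PySem.Dict.getD_insert_self, PySem.Dict.getD_insert_self,
        PySem.Dict.insert_insert_self, PySem.Dict.insert_insert_self]
    · rw [if_neg hb, if_neg hb]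
      exact ih X Y hX hY hndX hndY

-- lifting A's outer loop to the global dicts
theorem pvLiftOuter (c : String) (ks : List String) (suf : List String) :
    ∀ (s : Nat) (X Y : PySem.Dict String (PySem.Dict String String)),
      ks.drop s = suf →
      X.contains c = true → Y.contains c = true → X.keys.Nodup → Y.keys.Nodup →
      (PySem.List.enumerate suf (s : Int)).foldl (pvGOuter c ks) (X, Y) =
        (X.insert c ((pvARec c suf
            (X.getD c (PySem.Dict.mk []), Y.getD c (PySem.Dict.mk []))).1),
         Y.insert c ((pvARec c suf
            (X.getD c (PySem.Dict.mk []), Y.getD c (PySem.Dict.mk []))).2)) := by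
  induction suf with
  | nil =>
    intro s X Y hdrop hX hY hndX hndY
    simp only [PySem.List.enumerate_nil, List.foldl_nil, pvARec]
    rw [pvInsert_getD_self X c hX hndX, pvInsert_getD_self Y c hY hndY]
  | cons n suf ih =>
    intro s X Y hdrop hX hY hndX hndY
    rw [PySem.List.enumerate_cons, List.foldl_cons, pvGOuter_char]
    have hdrop' : ks.drop (s + 1) = suf := by
      have h1 : ks.drop (s + 1) = (ks.drop s).drop 1 := by
        rw [List.drop_drop, Nat.add_comm]
      rw [h1, hdrop, List.drop_one, List.tail_cons]
    have hcast : (s : Int) + 1 = ((s + 1 : Nat) : Int) := by push_cast; ring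
    have hloc : ∀ (x y : PySem.Dict String String),
        pvARec c (n :: suf) (x, y) =
          pvARec c suf (if (y.keys).contains n then suf.foldl (pvInner c n) (x, y) else (x, y)) := by
      intro x y; rfl
    by_cases hcn : ((Y.getD c (PySem.Dict.mk [])).contains n) = true
    · rw [if_pos hcn]
      have hrange : (PySem.List.pyRange ((s : Int) + 1) (PySem.List.len ks) 1).foldl
          (fun st i => pvGInner c n st (PySem.List.pyGetD ks i "")) (X, Y) =
          suf.foldl (pvGInner c n) (X, Y) := by
        rw [PySem.List.foldl_pyRange_pyGetD ks "" (pvGInner c n) (X, Y)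
            (a := (s : Int) + 1) (by positivity),
          show ((s : Int) + 1).toNat = s + 1 from by omega, hdrop']
      rw [hrange, pvLiftInner c n suf X Y hX hY hndX hndY]
      set x := X.getD c (PySem.Dict.mk []) with hx
      set y := Y.getD c (PySem.Dict.mk []) with hy
      set st' := suf.foldl (pvInner c n) (x, y) with hst'
      have hX' := PySem.Dict.contains_insert_self X c st'.1
      have hY' := PySem.Dict.contains_insert_self Y c st'.2
      have hndX' : (X.insert c st'.1).keys.Nodup := by
        rw [PySem.Dict.keys_insert_of_contains X _ hX]; exact hndX
      have hndY' : (Y.insert c st'.2).keys.Nodup := by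
        rw [PySem.Dict.keys_insert_of_contains Y _ hY]; exact hndY
      rw [hcast, ih (s + 1) _ _ hdrop' hX' hY' hndX' hndY']
      rw [PySem.Dict.getD_insert_self, PySem.Dict.getD_insert_self,
        PySem.Dict.insert_insert_self, PySem.Dict.insert_insert_self]
      rw [hloc x y]
      have hyk : (y.keys).contains n = true := by rw [pvKeysContains, hy]; exact hcn
      rw [hyk, if_pos rfl, ← hst']
    · rw [if_neg hcn]
      rw [hcast, ih (s + 1) X Y hdrop' hX hY hndX hndY]
      rw [hloc]
      have hyk : ((X.getD c (PySem.Dict.mk []), Y.getD c (PySem.Dict.mk [])).2.keys).contains n = false := by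
        rw [pvKeysContains]; simpa using hcn
      rw [hyk]
      simp

-- identity lemmas for removal-free clusters
theorem pvFoldl_id {α β : Type} (l : List β) (f : α → β → α)
    (h : ∀ st, ∀ b ∈ l, f st b = st) : ∀ st, l.foldl f st = st := by
  induction l with
  | nil => intro st; rfl
  | cons b t ih =>
    intro st
    rw [List.foldl_cons, h st b (List.mem_cons_self ..)]
    exact ih (fun st b hb => h st b (List.mem_cons_of_mem _ hb)) st

theorem pvInner_id (c n r : String) (st : PySem.Dict String String × PySem.Dict String String)
    (h : ¬(PySem.Set.len (pvW c r) = 1 ∧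
      0 < PySem.Set.len (PySem.Set.inter (pvW c n) (pvW c r)))) :
    pvInner c n st r = st := by
  cases st with
  | mk x y =>
    rw [pvInner_char]
    rw [if_neg]
    simp only [Bool.and_eq_true, not_and]
    intro _ hB
    exact h (of_decide_eq_true hB)

theorem pvGInner_id (c n r : String)
    (st : PySem.Dict String (PySem.Dict String String) × PySem.Dict String (PySem.Dict String String))
    (h : ¬(PySem.Set.len (pvW c r) = 1 ∧
      0 < PySem.Set.len (PySem.Set.inter (pvW c n) (pvW c r)))) :
    pvGInner c n st r = st := by
  cases st with
  | mk X Y =>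
    rw [pvGInner_char, if_neg]
    simp only [Bool.and_eq_true, not_and]
    intro _ hB
    exact h (of_decide_eq_true hB)

theorem pvARec_id (c : String) (ks : List String)
    (hpw : ks.Pairwise (fun n r => ¬(PySem.Set.len (pvW c r) = 1 ∧
      0 < PySem.Set.len (PySem.Set.inter (pvW c n) (pvW c r))))) :
    ∀ st, pvARec c ks st = st := by
  induction ks with
  | nil => intro st; rfl
  | cons n t ih =>
    intro st
    obtain ⟨hhead, htail⟩ := List.pairwise_cons.mp hpw
    have hfold : t.foldl (pvInner c n) st = st :=
      pvFoldl_id t (pvInner c n) (fun st r hr => pvInner_id c n r st (hhead r hr)) st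
    show pvARec c t (if (st.2.keys).contains n then t.foldl (pvInner c n) st else st) = st
    rw [hfold]
    have : (if (st.2.keys).contains n then st else st) = st := by split_ifs <;> rfl
    rw [this]
    exact ih htail st

theorem pvGOuter_id (c : String) (ks : List String)
    (hpw : ks.Pairwise (fun n r => ¬(PySem.Set.len (pvW c r) = 1 ∧
      0 < PySem.Set.len (PySem.Set.inter (pvW c n) (pvW c r))))) (suf : List String) :
    ∀ (s : Nat) (X Y : PySem.Dict String (PySem.Dict String String)), ks.drop s = suf →
      (PySem.List.enumerate suf (s : Int)).foldl (pvGOuter c ks) (X, Y) = (X, Y) := by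
  induction suf with
  | nil => intro s X Y _; rfl
  | cons n suf ih =>
    intro s X Y hdrop
    have hpwsuf : (n :: suf).Pairwise (fun n r => ¬(PySem.Set.len (pvW c r) = 1 ∧
        0 < PySem.Set.len (PySem.Set.inter (pvW c n) (pvW c r)))) := by
      rw [← hdrop]
      exact hpw.sublist (List.drop_sublist s ks)
    obtain ⟨hhead, -⟩ := List.pairwise_cons.mp hpwsuf
    have hdrop' : ks.drop (s + 1) = suf := by
      have h1 : ks.drop (s + 1) = (ks.drop s).drop 1 := by
        rw [List.drop_drop, Nat.add_comm]
      rw [h1, hdrop, List.drop_one, List.tail_cons]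
    have hcast : (s : Int) + 1 = ((s + 1 : Nat) : Int) := by push_cast; ring
    rw [PySem.List.enumerate_cons, List.foldl_cons, pvGOuter_char]
    have hrange : (PySem.List.pyRange ((s : Int) + 1) (PySem.List.len ks) 1).foldl
        (fun st i => pvGInner c n st (PySem.List.pyGetD ks i "")) (X, Y) = (X, Y) := by
      rw [PySem.List.foldl_pyRange_pyGetD ks "" (pvGInner c n) (X, Y)
          (a := (s : Int) + 1) (by positivity),
        show ((s : Int) + 1).toNat = s + 1 from by omega, hdrop']
      exact pvFoldl_id suf (pvGInner c n) (fun st r hr => pvGInner_id c n r st (hhead r hr)) _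
    have hif : (if ((Y.getD c (PySem.Dict.mk [])).contains n) = true
        then (PySem.List.pyRange ((s : Int) + 1) (PySem.List.len ks) 1).foldl
          (fun st i => pvGInner c n st (PySem.List.pyGetD ks i "")) (X, Y)
        else (X, Y)) = (X, Y) := by
      split_ifs
      · exact hrange
      · rfl
    rw [hif, hcast]
    exact ih (s + 1) X Y hdrop'

-- the per-cluster local action
def pvLocalA (capM : PySem.Dict String (PySem.Dict String String)) (c : String)
    (xy : PySem.Dict String String × PySem.Dict String String) :
    PySem.Dict String String × PySem.Dict String String :=
  pvARec c ((capM.getD c (PySem.Dict.mk [])).keys) xy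

-- lifting the loop over all clusters: a cluster is either backed by the classes dict
-- (X contains it) or removal-free (the step is the identity); in both cases the final items
-- are the per-cluster local results
theorem pvLiftClusters (capM : PySem.Dict String (PySem.Dict String String)) (cs : List String) :
    ∀ (X Y : PySem.Dict String (PySem.Dict String String)),
      cs.Nodup →
      (∀ c ∈ cs, X.contains c = true ∨ pvPairFree c ((capM.getD c (PySem.Dict.mk [])).keys)) →
      (∀ c ∈ cs, Y.contains c = true) →
      X.keys.Nodup → Y.keys.Nodup →
      cs.foldl (pvGCluster capM) (X, Y) =
        (PySem.Dict.mk (X.items.map (fun p => if p.1 ∈ cs then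
            (p.1, (pvLocalA capM p.1 (X.getD p.1 (PySem.Dict.mk []), Y.getD p.1 (PySem.Dict.mk []))).1)
          else p)),
         PySem.Dict.mk (Y.items.map (fun p => if p.1 ∈ cs then
            (p.1, (pvLocalA capM p.1 (X.getD p.1 (PySem.Dict.mk []), Y.getD p.1 (PySem.Dict.mk []))).2)
          else p))) := by
  induction cs with
  | nil =>
    intro X Y _ _ _ _ _
    simp
  | cons c cs ih =>
    intro X Y hnd hXc hYc hndX hndY
    have hYcc : Y.contains c = true := hYc c (List.mem_cons_self ..)
    have hcs : c ∉ cs := (List.nodup_cons.mp hnd).1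
    rw [List.foldl_cons]
    rcases hXc c (List.mem_cons_self ..) with hXcc | hpf
    · -- X contains the cluster: lift the double loop
      have hstep : pvGCluster capM (X, Y) c =
          (X.insert c ((pvLocalA capM c (X.getD c (PySem.Dict.mk []), Y.getD c (PySem.Dict.mk []))).1),
           Y.insert c ((pvLocalA capM c (X.getD c (PySem.Dict.mk []), Y.getD c (PySem.Dict.mk []))).2)) := by
        show (PySem.List.enumerate _ ((0 : Nat) : Int)).foldl _ _ = _
        exact pvLiftOuter c _ _ 0 X Y rfl hXcc hYcc hndX hndY
      rw [hstep]
      set a := (pvLocalA capM c (X.getD c (PySem.Dict.mk []), Y.getD c (PySem.Dict.mk []))).1 with ha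
      set b := (pvLocalA capM c (X.getD c (PySem.Dict.mk []), Y.getD c (PySem.Dict.mk []))).2 with hb
      have hX' : ∀ c' ∈ cs, (X.insert c a).contains c' = true ∨
          pvPairFree c' ((capM.getD c' (PySem.Dict.mk [])).keys) := by
        intro c' hc'
        rcases hXc c' (List.mem_cons_of_mem _ hc') with h | h
        · left
          rw [PySem.Dict.contains_insert]
          simp [h]
        · right; exact h
      have hY' : ∀ c' ∈ cs, (Y.insert c b).contains c' = true := by
        intro c' hc'
        rw [PySem.Dict.contains_insert]
        simp [hYc c' (List.mem_cons_of_mem _ hc')]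
      have hndX' : (X.insert c a).keys.Nodup := by
        rw [PySem.Dict.keys_insert_of_contains X _ hXcc]; exact hndX
      have hndY' : (Y.insert c b).keys.Nodup := by
        rw [PySem.Dict.keys_insert_of_contains Y _ hYcc]; exact hndY
      rw [ih _ _ (List.nodup_cons.mp hnd).2 hX' hY' hndX' hndY']
      have hitems : ∀ (Z : PySem.Dict String (PySem.Dict String String)) (v : PySem.Dict String String),
          Z.contains c = true → (Z.insert c v).items =
            Z.items.map (fun p => if (p.1 == c) = true then (c, v) else p) := by
        intro Z v h; exact PySem.Dict.items_insert_of_contains Z v h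
      rw [hitems X a hXcc, hitems Y b hYcc, List.map_map, List.map_map]
      have hmapeq : ∀ (Z : PySem.Dict String (PySem.Dict String String))
          (sel : PySem.Dict String String × PySem.Dict String String → PySem.Dict String String)
          (v : PySem.Dict String String),
          v = sel (pvLocalA capM c (X.getD c (PySem.Dict.mk []), Y.getD c (PySem.Dict.mk []))) →
          Z.items.map ((fun p => if p.1 ∈ cs then
              (p.1, sel (pvLocalA capM p.1 ((X.insert c a).getD p.1 (PySem.Dict.mk []),
                (Y.insert c b).getD p.1 (PySem.Dict.mk [])))) else p) ∘
            (fun p => if (p.1 == c) = true then (c, v) else p)) =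
          Z.items.map (fun p => if p.1 ∈ c :: cs then
              (p.1, sel (pvLocalA capM p.1 (X.getD p.1 (PySem.Dict.mk []),
                Y.getD p.1 (PySem.Dict.mk [])))) else p) := by
        intro Z sel v hv
        apply List.map_congr_left
        intro p _
        by_cases hpc : p.1 = c
        · simp only [Function.comp, hpc, beq_self_eq_true, if_true, hcs, List.mem_cons,
            or_false, if_pos (Or.inl rfl)]
          simp [hcs, hv]
        · have hb1 : (p.1 == c) = false := by simp [hpc]
          simp only [Function.comp, hb1, Bool.false_eq_true, if_false]
          have hg1 : (X.insert c a).getD p.1 (PySem.Dict.mk []) = X.getD p.1 (PySem.Dict.mk []) :=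
            PySem.Dict.getD_insert_of_ne X _ _ hpc
          have hg2 : (Y.insert c b).getD p.1 (PySem.Dict.mk []) = Y.getD p.1 (PySem.Dict.mk []) :=
            PySem.Dict.getD_insert_of_ne Y _ _ hpc
          rw [hg1, hg2]
          by_cases hin : p.1 ∈ cs
          · rw [if_pos hin, if_pos (by simp [List.mem_cons, hin])]
          · rw [if_neg hin, if_neg (by simp [List.mem_cons, hpc, hin])]
      rw [hmapeq X (fun q => q.1) a ha, hmapeq Y (fun q => q.2) b hb]
    · -- removal-free cluster: the step is the identity and the local action is too
      have hid : ∀ st, pvLocalA capM c st = st := by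
        intro st
        exact pvARec_id c _ hpf st
      have hstep : pvGCluster capM (X, Y) c = (X, Y) := by
        show (PySem.List.enumerate _ ((0 : Nat) : Int)).foldl _ _ = _
        exact pvGOuter_id c _ hpf _ 0 X Y rfl
      rw [hstep, ih _ _ (List.nodup_cons.mp hnd).2
        (fun c' hc' => hXc c' (List.mem_cons_of_mem _ hc'))
        (fun c' hc' => hYc c' (List.mem_cons_of_mem _ hc')) hndX hndY]
      have hmapeq : ∀ (Z : PySem.Dict String (PySem.Dict String String))
          (sel : PySem.Dict String String × PySem.Dict String String → PySem.Dict String String),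
          Z.keys.Nodup →
          (∀ p ∈ Z.items, p.1 = c →
            sel (X.getD c (PySem.Dict.mk []), Y.getD c (PySem.Dict.mk [])) = p.2) →
          Z.items.map (fun p => if p.1 ∈ cs then
              (p.1, sel (pvLocalA capM p.1 (X.getD p.1 (PySem.Dict.mk []),
                Y.getD p.1 (PySem.Dict.mk [])))) else p) =
          Z.items.map (fun p => if p.1 ∈ c :: cs then
              (p.1, sel (pvLocalA capM p.1 (X.getD p.1 (PySem.Dict.mk []),
                Y.getD p.1 (PySem.Dict.mk [])))) else p) := by
        intro Z sel hndZ hval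
        apply List.map_congr_left
        intro p hp
        by_cases hpc : p.1 = c
        · rw [if_neg (by rw [hpc]; exact hcs), if_pos (by rw [hpc]; exact List.mem_cons_self ..)]
          rw [hpc, hid, hval p hp hpc]
          rw [← hpc]
        · by_cases hin : p.1 ∈ cs
          · rw [if_pos hin, if_pos (by simp [List.mem_cons, hin])]
          · rw [if_neg hin, if_neg (by simp [List.mem_cons, hpc, hin])]
      have hvX : ∀ p ∈ X.items, p.1 = c →
          (X.getD c (PySem.Dict.mk []), Y.getD c (PySem.Dict.mk [])).1 = p.2 := by
        intro p hp hpc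
        show X.getD c (PySem.Dict.mk []) = p.2
        rw [← hpc]
        exact PySem.Dict.getD_of_mem_items X (by simpa using hp) hndX _
      have hvY : ∀ p ∈ Y.items, p.1 = c →
          (X.getD c (PySem.Dict.mk []), Y.getD c (PySem.Dict.mk [])).2 = p.2 := by
        intro p hp hpc
        show Y.getD c (PySem.Dict.mk []) = p.2
        rw [← hpc]
        exact PySem.Dict.getD_of_mem_items Y (by simpa using hp) hndY _
      rw [hmapeq X (fun q => q.1) hndX hvX, hmapeq Y (fun q => q.2) hndY hvY]

-- B's per-cluster pass, as a named step function (definitionally the lambda of pvDropped)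
def pvBStep (c : String) (st : PySem.Set String × PySem.Set String) (name : String) :
    PySem.Set String × PySem.Set String :=
  if PySem.Set.len (pvW c name) = 1 ∧ ¬ PySem.Set.isdisjoint st.1 (pvW c name) then
    (st.1, PySem.Set.add st.2 name)
  else (PySem.Set.union st.1 (pvW c name), st.2)

theorem pvDropped_def (c : String) (ns : List String) :
    pvDropped c ns = (ns.foldl (pvBStep c) (PySem.Set.empty, PySem.Set.empty)).2 := rfl

theorem pvBStep_char (c : String) (st : PySem.Set String × PySem.Set String) (name : String) :
    pvBStep c st name =
      if pvDropC c st.1 name = true then (st.1, PySem.Set.add st.2 name)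
      else (PySem.Set.union st.1 (pvW c name), st.2) := by
  simp only [pvBStep, pvDropC]
  split_ifs with h1 h2 h3
  · rfl
  · exact absurd (decide_eq_true h1) h2
  · exact absurd (of_decide_eq_true h3) h1
  · rfl

theorem pvBFold (c : String) (ns : List String) : ∀ (S K : PySem.Set String),
    (ns.foldl (pvBStep c) (S, K)).2 = PySem.Set.update K (pvDropList c ns S) := by
  induction ns with
  | nil =>
    intro S K
    simp [pvDropList, PySem.Set.update_nil]
  | cons name t ih =>
    intro S K
    rw [List.foldl_cons, pvBStep_char]
    by_cases hdc : pvDropC c S name = true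
    · rw [if_pos hdc]
      simp only [pvDropList, hdc, if_true]
      rw [PySem.Set.update_cons]
      exact ih S (K.add name)
    · rw [if_neg hdc]
      simp only [pvDropList, hdc, Bool.false_eq_true, if_false]
      exact ih _ K

theorem pvDropped_contains (c : String) (ns : List String) (k : String) :
    (pvDropped c ns).contains k = (pvDropList c ns PySem.Set.empty).contains k := by
  rw [pvDropped_def, pvBFold]
  rw [show (PySem.Set.empty : PySem.Set String) = ([] : List String) from rfl,
    PySem.Set.update_nil_left]
  rw [Bool.eq_iff_iff]
  simp [List.contains_iff_mem, PySem.Set.mem_ofList]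

-- lookups in a dict built by mapping over an association list
theorem pvGet?_mk_map {β γ : Type} (l : List (String × β)) (f : String × β → γ) (c : String) :
    (PySem.Dict.mk (l.map (fun p => (p.1, f p)))).get? c =
      (l.find? (fun p => p.1 == c)).map f := by
  induction l with
  | nil => rfl
  | cons p t ih =>
    by_cases h : (p.1 == c) = true
    · simp [PySem.Dict.get?, List.find?_cons, h]
    · have h1 : ((fun q : String × γ => q.1 == c) (p.1, f p)) = false := by simpa using h
      have h2 : ((fun q : String × β => q.1 == c) p) = false := by simpa using h
      simp only [PySem.Dict.get?] at ih ⊢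
      simp only [List.map_cons, List.find?_cons, h1, h2, Bool.false_eq_true, if_false]
      exact ih

theorem pvFind_self {β : Type} (l : List (String × β)) (q : String × β) (c : String)
    (hq : q ∈ l) (hqc : q.1 = c) (hnd : (l.map (fun p => p.1)).Nodup) :
    l.find? (fun p => p.1 == c) = some q := by
  induction l with
  | nil => cases hq
  | cons p t ih =>
    rcases List.mem_cons.mp hq with rfl | hq'
    · simp [List.find?_cons, hqc]
    · have hhead : p.1 ∉ t.map (fun p => p.1) := (List.nodup_cons.mp (by simpa using hnd)).1
      have hpc : (p.1 == c) = false := by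
        simp only [beq_eq_false_iff_ne, ne_eq]
        intro h
        exact hhead (h ▸ hqc ▸ List.mem_map.mpr ⟨q, hq', rfl⟩)
      simp only [List.find?_cons, hpc]
      exact ih hq' (List.nodup_cons.mp (by simpa using hnd)).2

theorem pvFind_none {β : Type} (l : List (String × β)) (c : String)
    (hc : c ∉ l.map (fun p => p.1)) :
    l.find? (fun p => p.1 == c) = none := by
  apply List.find?_eq_none.mpr
  intro p hp
  simp only [beq_eq_false_iff_ne, ne_eq, Bool.not_eq_true]
  intro h
  exact hc (h ▸ List.mem_map.mpr ⟨p, hp, rfl⟩)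

theorem pvKeys_mk_map {β : Type} (l : List (String × β)) (f : String × β → PySem.Dict String String) :
    (PySem.Dict.mk (l.map (fun p => (p.1, f p)))).keys = l.map (fun p => p.1) := by
  simp [PySem.Dict.keys, List.map_map, Function.comp]

-- a cluster in which some removal fires (¬ pvPairFree) has a name satisfying pvDropSpec
theorem pvNotPairFree_dropSpec (c : String) (ks : List String) (h : ¬ pvPairFree c ks) :
    ∃ r ∈ ks, pvDropSpec c ks r := by
  unfold pvPairFree at h
  rw [List.pairwise_iff_getElem] at h
  push_neg at h
  obtain ⟨i, j, hi, hj, hij, hcond⟩ := h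
  refine ⟨ks[j], List.getElem_mem hj, hcond.1, j, hj, List.getD_eq_getElem ks "" hj, i, hij, ?_⟩
  rw [List.getD_eq_getElem ks "" hi]
  exact hcond.2

-- the assembled equivalence
theorem pvAB_eq (cls cap : List (String × List (String × String)))
    (hclsN : (cls.map (fun p => p.1)).Nodup)
    (hcapN : (cap.map (fun p => p.1)).Nodup)
    (hcont : ∀ p ∈ cap, ∀ r ∈ p.2.map (fun q => q.1),
      pvDropSpec p.1 (p.2.map (fun q => q.1)) r →
        ∃ q ∈ cls, q.1 = p.1 ∧ r ∈ q.2.map (fun z => z.1)) :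
    remove_duplicated_biases cls cap = remove_duplicated_biases_alt cls cap := by
  rw [pvA_eq]
  have hcapKeys : (PySem.Dict.mk (cap.map (fun p => (p.1, PySem.Dict.mk p.2)))).keys =
      cap.map (fun p => p.1) := pvKeys_mk_map cap _
  have hclsKeys : (PySem.Dict.mk (cls.map (fun p => (p.1, PySem.Dict.mk p.2)))).keys =
      cls.map (fun p => p.1) := pvKeys_mk_map cls _
  have hXc : ∀ c ∈ cap.map (fun p => p.1),
      (PySem.Dict.mk (cls.map (fun p => (p.1, PySem.Dict.mk p.2)))).contains c = true ∨
        pvPairFree c (((PySem.Dict.mk (cap.map (fun p => (p.1, PySem.Dict.mk p.2)))).getD c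
          (PySem.Dict.mk [])).keys) := by
    intro c hc
    obtain ⟨p, hp, rfl⟩ := List.mem_map.mp hc
    have hg : (PySem.Dict.mk (cap.map (fun p => (p.1, PySem.Dict.mk p.2)))).getD p.1
        (PySem.Dict.mk []) = PySem.Dict.mk p.2 := by
      simp only [PySem.Dict.getD]
      rw [pvGet?_mk_map, pvFind_self cap p p.1 hp rfl hcapN]
      rfl
    by_cases hpf : pvPairFree p.1 (p.2.map (fun q => q.1))
    · right
      rw [hg]
      have hk : (PySem.Dict.mk p.2 : PySem.Dict String String).keys =
          p.2.map (fun q => q.1) := rfl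
      rw [hk]
      exact hpf
    · left
      obtain ⟨r, hr, hds⟩ := pvNotPairFree_dropSpec p.1 (p.2.map (fun q => q.1)) hpf
      obtain ⟨q, hq, hq1, -⟩ := hcont p hp r hr hds
      simp only [PySem.Dict.contains, List.any_eq_true]
      exact ⟨(q.1, PySem.Dict.mk q.2), List.mem_map.mpr ⟨q, hq, rfl⟩, by simp [hq1]⟩
  have hYc : ∀ c ∈ cap.map (fun p => p.1),
      (PySem.Dict.mk (cap.map (fun p => (p.1, PySem.Dict.mk p.2)))).contains c = true := by
    intro c hc
    obtain ⟨p, hp, rfl⟩ := List.mem_map.mp hc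
    simp only [PySem.Dict.contains, List.any_eq_true]
    exact ⟨(p.1, PySem.Dict.mk p.2), List.mem_map.mpr ⟨p, hp, rfl⟩, by simp⟩
  rw [hcapKeys]
  rw [pvLiftClusters _ _ _ _ hcapN hXc hYc (by rw [hclsKeys]; exact hclsN)
    (by rw [hcapKeys]; exact hcapN)]
  show (_ = _)
  apply Prod.ext
  · -- classes side
    show ((cls.map (fun p => (p.1, PySem.Dict.mk p.2))).map _).map _ = _
    rw [List.map_map, List.map_map]
    apply List.map_congr_left
    intro p hp
    simp only [Function.comp]
    by_cases hin : p.1 ∈ cap.map (fun p => p.1)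
    · obtain ⟨pc, hpc, hpc1⟩ := List.mem_map.mp hin
      rw [if_pos hin]
      have hgx : (PySem.Dict.mk (cls.map (fun p => (p.1, PySem.Dict.mk p.2)))).getD p.1
          (PySem.Dict.mk []) = PySem.Dict.mk p.2 := by
        simp only [PySem.Dict.getD]
        rw [pvGet?_mk_map, pvFind_self cls p p.1 hp rfl hclsN]
        rfl
      have hgy : (PySem.Dict.mk (cap.map (fun p => (p.1, PySem.Dict.mk p.2)))).getD p.1
          (PySem.Dict.mk []) = PySem.Dict.mk pc.2 := by
        simp only [PySem.Dict.getD]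
        rw [pvGet?_mk_map, pvFind_self cap pc p.1 hpc hpc1 hcapN]
        rfl
      have hy0 : ∀ m ∈ ((PySem.Dict.mk pc.2 : PySem.Dict String String)).keys,
          (PySem.Dict.mk pc.2 : PySem.Dict String String).contains m =
            !pvDropC p.1 PySem.Set.empty m := by
        intro m hm
        rw [pvDropC_empty, ← pvKeysContains]
        simp only [Bool.not_false]
        simp only [PySem.Dict.keys] at hm
        simpa using hm
      rw [pvLocalA, hgx, hgy, pvARec_spec p.1 _ PySem.Set.empty _ _ hy0]
      have hdropD : (PySem.Dict.mk (cap.map (fun p =>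
          (p.1, pvDropped p.1 (p.2.map (fun q => q.1)))))).getD p.1 PySem.Set.empty =
          pvDropped pc.1 (pc.2.map (fun q => q.1)) := by
        simp only [PySem.Dict.getD]
        rw [pvGet?_mk_map, pvFind_self cap pc p.1 hpc hpc1 hcapN]
        rfl
      show (p.1, _) = (p.1, _)
      simp only [remove_duplicated_biases_alt]
      rw [hdropD]
      congr 1
      apply List.filter_congr
      intro q _
      rw [pvDropped_contains, hpc1]
      rw [← pvSurv_eq p.1 _ PySem.Set.empty q.1 (Or.inl (pvDropC_empty p.1 q.1))]
      rfl
    · rw [if_neg hin]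
      have hdropD : (PySem.Dict.mk (cap.map (fun p =>
          (p.1, pvDropped p.1 (p.2.map (fun q => q.1)))))).getD p.1 PySem.Set.empty =
          PySem.Set.empty := by
        simp only [PySem.Dict.getD]
        rw [pvGet?_mk_map, pvFind_none cap p.1 hin]
        rfl
      show (p.1, p.2) = (p.1, _)
      rw [hdropD]
      simp [PySem.Set.empty]
  · -- captions side
    show ((cap.map (fun p => (p.1, PySem.Dict.mk p.2))).map _).map _ = _
    rw [List.map_map, List.map_map]
    apply List.map_congr_left
    intro p hp
    simp only [Function.comp]
    have hin : p.1 ∈ cap.map (fun p => p.1) := List.mem_map.mpr ⟨p, hp, rfl⟩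
    rw [if_pos hin]
    have hgy : (PySem.Dict.mk (cap.map (fun p => (p.1, PySem.Dict.mk p.2)))).getD p.1
        (PySem.Dict.mk []) = PySem.Dict.mk p.2 := by
      simp only [PySem.Dict.getD]
      rw [pvGet?_mk_map, pvFind_self cap p p.1 hp rfl hcapN]
      rfl
    have hy0 : ∀ m ∈ ((PySem.Dict.mk p.2 : PySem.Dict String String)).keys,
        (PySem.Dict.mk p.2 : PySem.Dict String String).contains m =
          !pvDropC p.1 PySem.Set.empty m := by
      intro m hm
      rw [pvDropC_empty, ← pvKeysContains]
      simp only [Bool.not_false]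
      simp only [PySem.Dict.keys] at hm
      simpa using hm
    rw [pvLocalA, hgy, pvARec_spec p.1 _ PySem.Set.empty _ _ hy0]
    have hdropD : (PySem.Dict.mk (cap.map (fun p =>
        (p.1, pvDropped p.1 (p.2.map (fun q => q.1)))))).getD p.1 PySem.Set.empty =
        pvDropped p.1 (p.2.map (fun q => q.1)) := by
      simp only [PySem.Dict.getD]
      rw [pvGet?_mk_map, pvFind_self cap p p.1 hp rfl hcapN]
      rfl
    show (p.1, _) = (p.1, _)
    simp only [remove_duplicated_biases_alt]
    rw [hdropD]
    congr 1
    apply List.filter_congr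
    intro q _
    rw [pvDropped_contains]
    rw [← pvSurv_eq p.1 _ PySem.Set.empty q.1 (Or.inl (pvDropC_empty p.1 q.1))]
    rfl

-- ===== VERDICT (by name: the statement is the Claim_ definition above) =====
theorem remove_duplicated_biases_spec : Claim_equal_remove_duplicated_biases := by
  intro cls cap _ hpre
  obtain ⟨⟨hclsN, -⟩, ⟨hcapN, -⟩, hcont⟩ := hpre
  unfold Spec_remove_duplicated_biases
  exact pvAB_eq cls cap hclsN hcapN hcont
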